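-- pv_equiv track=rewrite | github.com/ThePiep/adventofcode | 2025/day12/prog.py | to_standard_perm
-- ===== SOURCE A (Python) =====
-- def to_standard_perm(state: str, w: int, h: int) -> str:
--     res: list[str] = []
--
--     # reflections
--     res.append(state)
--     res.append(
--         "".join([state[w - 1 - (i % w) + w * (i // w)] for i in range(len(state))])
--     )
--     res.append(
--         "".join([state[(i % w) + w * (h - 1 - (i // w))] for i in range(len(state))])
--     )
--     res.append(
--         "".join(
--             [state[w - 1 - (i % w) + w * (h - 1 - (i // w))] for i in range(len(state))]
--         )
--     )
--     return min(res)
-- ===== SOURCE B (Python) =====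
-- def to_standard_perm(state: str, w: int, h: int) -> str:
--     if not state:
--         return state
--     if len(state) != w * h:
--         raise ValueError("state length does not match w*h")
--     rows = [state[r * w:(r + 1) * w] for r in range(h)]
--     horiz = "".join(row[::-1] for row in rows)
--     vert = "".join(rows[::-1])
--     both = "".join(row[::-1] for row in reversed(rows))
--     return min([state, horiz, vert, both])
-- ===== Notes on version B (the rewrite author's own statement) =====
-- stated objective: simpler
-- what changed: Replaces the four per-character reflection index formulas (i%w, i//w arithmetic) by one reshape of the flat string into h row slices, from which all four reflections are built by row slicing and reversal (empty input returned as-is; ValueError when len(state) != w*h).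
-- outside the precondition, e.g. on to_standard_perm('ab', 1, 1): A returns 'ab', B raises ValueError; on to_standard_perm('abc', 1, 0): A returns 'abc', B raises ValueError; on to_standard_perm('abc', -1, 0): A returns 'abc', B raises ValueError
import Mathlib
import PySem

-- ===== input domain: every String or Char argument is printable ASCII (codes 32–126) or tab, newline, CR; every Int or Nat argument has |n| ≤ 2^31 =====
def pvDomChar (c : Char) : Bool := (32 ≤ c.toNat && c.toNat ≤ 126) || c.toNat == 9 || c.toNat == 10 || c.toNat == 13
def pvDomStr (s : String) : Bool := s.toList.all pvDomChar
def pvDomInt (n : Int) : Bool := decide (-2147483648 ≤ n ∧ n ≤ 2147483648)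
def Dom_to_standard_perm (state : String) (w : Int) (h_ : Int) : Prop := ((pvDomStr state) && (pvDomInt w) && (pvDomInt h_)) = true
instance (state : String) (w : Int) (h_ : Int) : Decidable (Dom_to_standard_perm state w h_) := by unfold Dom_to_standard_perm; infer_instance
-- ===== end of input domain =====

-- B validates len(state) = w*h (ValueError on a non-empty mismatch), reshapes the flat
-- string into h row slices and builds the four reflections by row slicing and reversal
-- instead of per-index reflection arithmetic (objective: simpler).

-- ===== PORT A =====
def to_standard_perm (state : String) (w : Int) (h_ : Int) : String :=
  let s := state.toList
  let n : Int := (s.length : Int)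
  -- res.append(state); three comprehensions with reflection index arithmetic; min(res)
  let r1 := String.ofList ((PySem.List.pyRange 0 n 1).map (fun i =>
      PySem.List.pyGetD s (w - 1 - PySem.Int.mod i w + w * PySem.Int.floordiv i w) ' '))
  let r2 := String.ofList ((PySem.List.pyRange 0 n 1).map (fun i =>
      PySem.List.pyGetD s (PySem.Int.mod i w + w * (h_ - 1 - PySem.Int.floordiv i w)) ' '))
  let r3 := String.ofList ((PySem.List.pyRange 0 n 1).map (fun i =>
      PySem.List.pyGetD s (w - 1 - PySem.Int.mod i w + w * (h_ - 1 - PySem.Int.floordiv i w)) ' '))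
  ((PySem.List.min? [state, r1, r2, r3] (fun x => x)).getD "")

-- ===== PORT B =====
def to_standard_perm_alt (state : String) (w : Int) (h_ : Int) : String :=
  if state.toList.length = 0 then state   -- if not state: return state
  -- if len(state) != w * h: raise ValueError  (outside Pre_)
  else if (state.toList.length : Int) ≠ w * h_ then ""
  else
    let s := state.toList
    -- rows = [state[r*w:(r+1)*w] for r in range(h)]
    let rows : List (List Char) := (PySem.List.pyRange 0 h_ 1).map (fun r =>
        PySem.List.slice s (some (r * w)) (some ((r + 1) * w)))
    let horiz := String.ofList (rows.flatMap (fun row => row.reverse))   -- row[::-1] is reverse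
    let vert  := String.ofList rows.reverse.flatten                      -- rows[::-1]
    let both  := String.ofList (rows.reverse.flatMap (fun row => row.reverse))
    ((PySem.List.min? [state, horiz, vert, both] (fun x => x)).getD "")

-- ===== PRECONDITION & SPEC =====
-- Pre_ is the consistent grids (len(state) = w*h_ with w, h_ ≥ 1) together with every
-- empty-string input (A returns '' there for any w, h_, and so does B). Besides all inputs
-- where A raises, it excludes the inputs where A returns a value assembled through Python's
-- negative-index wraparound although len(state) ≠ w*h_ (e.g. ('ab',1,1) → 'ab'); B, which
-- validates the shape, raises ValueError on all of those.
def Pre_to_standard_perm (state : String) (w : Int) (h_ : Int) : Prop :=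
  ((state.toList.length : Int) = w * h_ ∧ 1 ≤ w ∧ 1 ≤ h_) ∨ (state.toList.length : Int) = 0
instance (state : String) (w : Int) (h_ : Int) : Decidable (Pre_to_standard_perm state w h_) := by
  unfold Pre_to_standard_perm; infer_instance

def pvWitness_to_standard_perm : String × Int × Int := ("dcba", 2, 2)

def Spec_to_standard_perm (state : String) (w : Int) (h_ : Int) (out : String) : Prop := out = to_standard_perm_alt state w h_
instance (state : String) (w : Int) (h_ : Int) (out : String) : Decidable (Spec_to_standard_perm state w h_ out) := by unfold Spec_to_standard_perm; infer_instance

-- ===== CLAIM (what is proved, stated in full; the proofs are below) =====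
def Claim_equal_to_standard_perm : Prop := ∀ (state : String) (w : Int) (h_ : Int), Dom_to_standard_perm state w h_ → Pre_to_standard_perm state w h_ → Spec_to_standard_perm state w h_ (to_standard_perm state w h_)

-- ===== LEMMAS AND PROOFS =====

-- row r of the reshaped grid
def pvRow (s : List Char) (W r : Nat) : List Char := (s.drop (W * r)).take W

theorem pv_flatMap_congr {α β : Type} {l : List α} {f g : α → List β}
    (h : ∀ a ∈ l, f a = g a) : l.flatMap f = l.flatMap g := by
  induction l with
  | nil => rfl
  | cons x t ih =>
    simp only [List.flatMap_cons]
    rw [h x (by simp), ih (fun a ha => h a (by simp [ha]))]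

theorem pv_flatMap_map {α β γ : Type} (l : List α) (f : α → β) (g : β → List γ) :
    (l.map f).flatMap g = l.flatMap (fun a => g (f a)) := by
  induction l with
  | nil => rfl
  | cons x t ih => simp only [List.map_cons, List.flatMap_cons, ih]

-- block decomposition of range (W*H)
theorem pv_range_mul_block {α : Type} (W H : Nat) (f : Nat → α) :
    (List.range (W * H)).map f
      = (List.range H).flatMap (fun r => (List.range W).map (fun j => f (r * W + j))) := by
  induction H with
  | zero => simp
  | succ H ih =>
    have e : W * (H + 1) = W * H + W := by ring
    rw [e, List.range_add, List.map_append, ih, List.range_succ, List.flatMap_append]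
    simp [List.map_map, Function.comp, Nat.mul_comm, Nat.add_comm]

-- a comprehension over range(n) equals a map over List.range n
theorem pv_map_pyRange {α : Type} (n : Nat) (f : Int → α) (g : Nat → α)
    (h : ∀ k < n, f (k : Int) = g k) :
    (PySem.List.pyRange 0 (n : Int) 1).map f = (List.range n).map g := by
  rw [PySem.List.pyRange_one]
  have hn : (((n : Int)) - 0).toNat = n := by omega
  rw [hn, List.map_map]
  apply List.map_congr_left
  intro k hk
  simp only [Function.comp, zero_add]
  exact h k (List.mem_range.mp hk)

theorem pv_map_getD_row (s : List Char) (W a : Nat) (d : Char) (h : a + W ≤ s.length) :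
    (List.range W).map (fun j => s.getD (j + a) d) = (s.drop a).take W := by
  apply List.ext_getElem
  · simp; omega
  · intro j h1 h2
    simp only [List.getElem_map, List.getElem_range, List.getElem_take, List.getElem_drop]
    rw [List.getD_eq_getElem s d (by simp at h1 ⊢; omega)]
    congr 1
    simp at h1
    omega

theorem pv_map_getD_row_rev (s : List Char) (W a : Nat) (d : Char) (h : a + W ≤ s.length) :
    (List.range W).map (fun j => s.getD (W - 1 - j + a) d) = ((s.drop a).take W).reverse := by
  apply List.ext_getElem
  · simp; omega
  · intro j h1 h2
    simp only [List.getElem_map, List.getElem_range, List.getElem_reverse, List.getElem_take,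
      List.getElem_drop]
    rw [List.getD_eq_getElem s d (by simp at h1 ⊢; omega)]
    congr 1
    simp at h1 h2 ⊢
    omega

theorem pv_range_reverse (H : Nat) :
    (List.range H).reverse = (List.range H).map (fun r => H - 1 - r) := by
  apply List.ext_getElem
  · simp
  · intro j h1 h2
    simp only [List.getElem_reverse, List.getElem_map, List.getElem_range, List.length_range]

-- the three reflection comprehensions of A, as flatMaps over the reshaped rows
theorem pv_A1 (s : List Char) (W H : Nat) (hW : 1 ≤ W) (hs : s.length = W * H) :
    (List.range (W * H)).map
        (fun k => s.getD (W - 1 - k % W + W * (k / W)) ' ')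
      = (List.range H).flatMap (fun r => (pvRow s W r).reverse) := by
  rw [pv_range_mul_block]
  apply pv_flatMap_congr
  intro r hr
  simp only [List.mem_range] at hr
  have hrow : W * r + W ≤ s.length := by
    rw [hs]
    calc W * r + W = W * (r + 1) := by ring
    _ ≤ W * H := Nat.mul_le_mul_left W hr
  simp only [pvRow]
  rw [← pv_map_getD_row_rev s W (W * r) ' ' hrow]
  apply List.map_congr_left
  intro j hj
  simp only [List.mem_range] at hj
  have e1 : (r * W + j) % W = j := by
    rw [Nat.mul_comm r W, Nat.mul_add_mod]; exact Nat.mod_eq_of_lt hj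
  have e2 : (r * W + j) / W = r := by
    rw [Nat.mul_comm r W, Nat.mul_add_div (by omega), Nat.div_eq_of_lt hj]
    omega
  rw [e1, e2]

theorem pv_A2 (s : List Char) (W H : Nat) (hW : 1 ≤ W) (hs : s.length = W * H) :
    (List.range (W * H)).map
        (fun k => s.getD (k % W + W * (H - 1 - k / W)) ' ')
      = (List.range H).flatMap (fun r => pvRow s W (H - 1 - r)) := by
  rw [pv_range_mul_block]
  apply pv_flatMap_congr
  intro r hr
  simp only [List.mem_range] at hr
  have hrow : W * (H - 1 - r) + W ≤ s.length := by
    rw [hs]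
    have e : H - 1 - r + 1 ≤ H := by omega
    calc W * (H - 1 - r) + W = W * (H - 1 - r + 1) := by ring
    _ ≤ W * H := Nat.mul_le_mul_left W e
  simp only [pvRow]
  rw [← pv_map_getD_row s W (W * (H - 1 - r)) ' ' hrow]
  apply List.map_congr_left
  intro j hj
  simp only [List.mem_range] at hj
  have e1 : (r * W + j) % W = j := by
    rw [Nat.mul_comm r W, Nat.mul_add_mod]; exact Nat.mod_eq_of_lt hj
  have e2 : (r * W + j) / W = r := by
    rw [Nat.mul_comm r W, Nat.mul_add_div (by omega), Nat.div_eq_of_lt hj]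
    omega
  rw [e1, e2]

theorem pv_A3 (s : List Char) (W H : Nat) (hW : 1 ≤ W) (hs : s.length = W * H) :
    (List.range (W * H)).map
        (fun k => s.getD (W - 1 - k % W + W * (H - 1 - k / W)) ' ')
      = (List.range H).flatMap (fun r => (pvRow s W (H - 1 - r)).reverse) := by
  rw [pv_range_mul_block]
  apply pv_flatMap_congr
  intro r hr
  simp only [List.mem_range] at hr
  have hrow : W * (H - 1 - r) + W ≤ s.length := by
    rw [hs]
    have e : H - 1 - r + 1 ≤ H := by omega
    calc W * (H - 1 - r) + W = W * (H - 1 - r + 1) := by ring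
    _ ≤ W * H := Nat.mul_le_mul_left W e
  simp only [pvRow]
  rw [← pv_map_getD_row_rev s W (W * (H - 1 - r)) ' ' hrow]
  apply List.map_congr_left
  intro j hj
  simp only [List.mem_range] at hj
  have e1 : (r * W + j) % W = j := by
    rw [Nat.mul_comm r W, Nat.mul_add_mod]; exact Nat.mod_eq_of_lt hj
  have e2 : (r * W + j) / W = r := by
    rw [Nat.mul_comm r W, Nat.mul_add_div (by omega), Nat.div_eq_of_lt hj]
    omega
  rw [e1, e2]

-- B's slice-built rows are the reshaped rows
theorem pv_rowsB (s : List Char) (W H : Nat) :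
    (PySem.List.pyRange 0 (H : Int) 1).map
        (fun r => PySem.List.slice s (some (r * (W : Int))) (some ((r + 1) * (W : Int))))
      = (List.range H).map (fun k => pvRow s W k) := by
  apply pv_map_pyRange
  intro k _
  have h1 : ((k : Int)) * (W : Int) = ((W * k : Nat) : Int) := by push_cast; ring
  have h2 : ((k : Int) + 1) * (W : Int) = ((W * k : Nat) : Int) + ((W : Nat) : Int) := by
    push_cast; ring
  rw [h1, h2, PySem.List.slice_natCast_add]
  rfl

theorem pv_core_empty (state : String) (w h_ : Int) (hn : state.toList.length = 0) :
    to_standard_perm state w h_ = to_standard_perm_alt state w h_ := by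
  have hnil : state.toList = [] := List.eq_nil_of_length_eq_zero hn
  have hstate : state = "" := String.toList_eq_nil_iff.mp hnil
  subst hstate
  simp [to_standard_perm, to_standard_perm_alt, PySem.List.pyRange_one_eq_nil,
    PySem.List.min?]

theorem pv_core (state : String) (W H : Nat) (hW : 1 ≤ W) (_hH : 1 ≤ H)
    (hs : state.toList.length = W * H) :
    to_standard_perm state (W : Int) (H : Int) = to_standard_perm_alt state (W : Int) (H : Int) := by
    have cast1 : (PySem.List.pyRange 0 (((W * H : Nat)) : Int) 1).map
        (fun i => PySem.List.pyGetD state.toList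
          ((W : Int) - 1 - PySem.Int.mod i (W : Int) + (W : Int) * PySem.Int.floordiv i (W : Int)) ' ')
        = (List.range (W * H)).map (fun k => state.toList.getD (W - 1 - k % W + W * (k / W)) ' ') := by
      apply pv_map_pyRange
      intro k _
      simp only [PySem.Int.mod_natCast, PySem.Int.floordiv_natCast]
      have hkm : k % W < W := Nat.mod_lt _ (by omega)
      have e : ((W : Int) - 1 - ((k % W : Nat) : Int) + (W : Int) * ((k / W : Nat) : Int))
          = ((W - 1 - k % W + W * (k / W) : Nat) : Int) := by
        rw [Nat.cast_add, Nat.cast_mul]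
        have e2 : ((W - 1 - k % W : Nat) : Int) = (W : Int) - 1 - ((k % W : Nat) : Int) := by omega
        rw [e2]
      rw [e, PySem.List.pyGetD_natCast]
    have cast2 : (PySem.List.pyRange 0 (((W * H : Nat)) : Int) 1).map
        (fun i => PySem.List.pyGetD state.toList
          (PySem.Int.mod i (W : Int) + (W : Int) * ((H : Int) - 1 - PySem.Int.floordiv i (W : Int))) ' ')
        = (List.range (W * H)).map (fun k => state.toList.getD (k % W + W * (H - 1 - k / W)) ' ') := by
      apply pv_map_pyRange
      intro k hk
      simp only [PySem.Int.mod_natCast, PySem.Int.floordiv_natCast]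
      have hkd : k / W < H := Nat.div_lt_of_lt_mul (by omega)
      have e : (((k % W : Nat) : Int) + (W : Int) * ((H : Int) - 1 - ((k / W : Nat) : Int)))
          = ((k % W + W * (H - 1 - k / W) : Nat) : Int) := by
        have e1 : ((H : Int) - 1 - ((k / W : Nat) : Int)) = ((H - 1 - k / W : Nat) : Int) := by omega
        rw [e1, ← Nat.cast_mul, ← Nat.cast_add]
      rw [e, PySem.List.pyGetD_natCast]
    have cast3 : (PySem.List.pyRange 0 (((W * H : Nat)) : Int) 1).map
        (fun i => PySem.List.pyGetD state.toList
          ((W : Int) - 1 - PySem.Int.mod i (W : Int) + (W : Int) * ((H : Int) - 1 - PySem.Int.floordiv i (W : Int))) ' ')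
        = (List.range (W * H)).map (fun k => state.toList.getD (W - 1 - k % W + W * (H - 1 - k / W)) ' ') := by
      apply pv_map_pyRange
      intro k hk
      simp only [PySem.Int.mod_natCast, PySem.Int.floordiv_natCast]
      have hkm : k % W < W := Nat.mod_lt _ (by omega)
      have hkd : k / W < H := Nat.div_lt_of_lt_mul (by omega)
      have e : ((W : Int) - 1 - ((k % W : Nat) : Int) + (W : Int) * ((H : Int) - 1 - ((k / W : Nat) : Int)))
          = ((W - 1 - k % W + W * (H - 1 - k / W) : Nat) : Int) := by
        have e1 : ((H : Int) - 1 - ((k / W : Nat) : Int)) = ((H - 1 - k / W : Nat) : Int) := by omega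
        have e2 : ((W - 1 - k % W : Nat) : Int) = (W : Int) - 1 - ((k % W : Nat) : Int) := by omega
        rw [e1, ← Nat.cast_mul, Nat.cast_add, e2]
      rw [e, PySem.List.pyGetD_natCast]
    have hn0 : ¬ (state.toList.length = 0) := by
      intro h0
      rw [h0] at hs
      have := Nat.mul_pos (by omega : 0 < W) (by omega : 0 < H)
      omega
    have hg : ¬ ((state.toList.length : Int) ≠ (W : Int) * (H : Int)) :=
      fun hc => hc (by rw [hs]; push_cast; ring)
    simp only [to_standard_perm, to_standard_perm_alt]
    rw [if_neg hn0, if_neg hg, hs]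
    rw [cast1, cast2, cast3, pv_A1 state.toList W H hW hs, pv_A2 state.toList W H hW hs,
      pv_A3 state.toList W H hW hs, pv_rowsB state.toList W H]
    simp only [← List.flatMap_id, ← List.map_reverse, pv_range_reverse, List.map_map,
      pv_flatMap_map, Function.comp, id]

-- ===== VERDICT (by name: the statement is the Claim_ definition above) =====
theorem to_standard_perm_spec : Claim_equal_to_standard_perm := by
  intro state w h_ _ hpre
  unfold Spec_to_standard_perm
  rcases hpre with ⟨hlen, hw, hh⟩ | hn
  · obtain ⟨W, rfl⟩ : ∃ W : Nat, w = (W : Int) := ⟨w.toNat, by omega⟩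
    obtain ⟨H, rfl⟩ : ∃ H : Nat, h_ = (H : Int) := ⟨h_.toNat, by omega⟩
    have hs : state.toList.length = W * H := by
      have e : (state.toList.length : Int) = ((W * H : Nat) : Int) := by
        rw [hlen]; push_cast; ring
      exact_mod_cast e
    exact pv_core state W H (by exact_mod_cast hw) (by exact_mod_cast hh) hs
  · exact pv_core_empty state w h_ (by exact_mod_cast hn)
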